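-- pv_equiv track=rewrite | github.com/paularnaud2/CAPC5 | Python/toolDup.py | del_dup_list
-- ===== SOURCE A (Python) =====
-- def del_dup_list(in_list):
--     # if in_list elements are hashable
--     if isinstance(in_list[0], str):
--         out_list = list(set(in_list))
--         out_list.sort()
--         return out_list
--
--     # if not
--     in_sorted = sorted(in_list)
--     out_list = [in_sorted[0]]
--     old_elt = in_sorted[0]
--     for elt in in_sorted[1:]:
--         if elt > old_elt:
--             out_list.append(elt)
--             old_elt = elt
--
--     return out_list
-- ===== SOURCE B (Python) =====
-- def del_dup_list(in_list):
--     # online sorted insertion: keep out_list sorted and duplicate-free at all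
--     # times; a hand-written binary search finds each element's slot, then either
--     # skip it (already present) or insert it there (no sort() call, no set)
--     out_list = []
--     for elt in in_list:
--         lo, hi = 0, len(out_list)
--         while lo < hi:
--             mid = (lo + hi) // 2
--             if out_list[mid] < elt:
--                 lo = mid + 1
--             else:
--                 hi = mid
--         if lo < len(out_list) and out_list[lo] == elt:
--             continue
--         out_list.insert(lo, elt)
--     return out_list
-- ===== Notes on version B (the rewrite author's own statement) =====
-- stated objective: alternative
-- what changed: B drops A's set-then-sort entirely and builds the result by online sorted insertion: for each incoming element a hand-written binary search finds its slot in an always-sorted duplicate-free accumulator, and the element is inserted there or skipped if already present (no sort() call, no set); B also returns [] on the empty list where A raises IndexError.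
-- outside the precondition, e.g. on del_dup_list([]): A raises IndexError, B returns []
import Mathlib
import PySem

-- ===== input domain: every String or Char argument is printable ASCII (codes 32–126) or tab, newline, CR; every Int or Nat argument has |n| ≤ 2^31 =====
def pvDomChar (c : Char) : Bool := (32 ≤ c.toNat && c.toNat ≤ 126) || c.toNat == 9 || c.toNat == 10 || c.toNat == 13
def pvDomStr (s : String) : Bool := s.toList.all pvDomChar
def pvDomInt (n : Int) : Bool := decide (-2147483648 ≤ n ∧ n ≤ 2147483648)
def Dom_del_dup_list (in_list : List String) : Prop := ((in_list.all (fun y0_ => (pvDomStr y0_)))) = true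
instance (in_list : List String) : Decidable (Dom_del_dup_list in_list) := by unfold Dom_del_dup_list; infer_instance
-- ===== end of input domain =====

-- B replaces A's set-then-sort by online sorted insertion (binary-search slot + insert
-- into an always-sorted duplicate-free accumulator; no sort call, no set) — an
-- alternative algorithm; on the empty list A raises IndexError, B returns [].


-- ===== PORT A =====
-- A: out_list = list(set(in_list)); out_list.sort(); return out_list
-- (the isinstance(in_list[0], str) dispatch is always true for List String; it raises
--  IndexError on the empty list, excluded by Pre_)
def del_dup_list (in_list : List String) : List String :=
  PySem.List.sorted (PySem.Set.ofList in_list) (fun x => x) false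

-- ===== PORT B =====
-- B's while loop 'while lo < hi: mid = (lo+hi)//2; if out[mid] < elt: lo = mid+1 else: hi = mid'
-- (lo, hi stay non-negative Python ints, hence Nat; on every call mid < hi ≤ len(out),
--  so out_list[mid] never raises and pyGetD with a dummy default is exact there)
def pvBis (out : List String) (elt : String) (lo hi : Nat) : Nat :=
  if _h : lo < hi then
    let mid := (lo + hi) / 2
    if PySem.List.pyGetD out (mid : Int) "" < elt then pvBis out elt (mid + 1) hi
    else pvBis out elt lo mid
  else lo
termination_by hi - lo
decreasing_by all_goals omega

-- B: for elt in in_list: binary-search lo; skip if out_list[lo] == elt; else out_list.insert(lo, elt)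
-- ('lo < len(out_list) and out_list[lo] == elt' is exactly out_list[lo]? = some elt)
def del_dup_list_alt (in_list : List String) : List String :=
  in_list.foldl
    (fun out_list elt =>
      let lo := pvBis out_list elt 0 out_list.length
      if out_list[lo]? = some elt then out_list
      else PySem.List.insert out_list (lo : Int) elt)
    []

-- ===== PRECONDITION & SPEC =====
-- Pre_ excludes only the empty list, on which A raises IndexError probing in_list[0]
-- for the isinstance dispatch (B returns [] there).
def Pre_del_dup_list (in_list : List String) : Prop := in_list ≠ []
instance (in_list : List String) : Decidable (Pre_del_dup_list in_list) := by
  unfold Pre_del_dup_list; infer_instance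
def pvWitness_del_dup_list : List String := ["b", "a", "b"]

def Spec_del_dup_list (in_list : List String) (out : List String) : Prop :=
  out = del_dup_list_alt in_list
instance (in_list : List String) (out : List String) : Decidable (Spec_del_dup_list in_list out) := by
  unfold Spec_del_dup_list; infer_instance

-- ===== CLAIM (what is proved, stated in full; the proofs are below) =====
def Claim_equal_del_dup_list : Prop := ∀ (in_list : List String),
  Dom_del_dup_list in_list → Pre_del_dup_list in_list →
  Spec_del_dup_list in_list (del_dup_list in_list)

-- ===== LEMMAS AND PROOFS =====

-- the ordered insert that B's step performs on a sorted accumulator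
def pvInsU (xs : List String) (elt : String) : List String :=
  match xs with
  | [] => [elt]
  | x :: t => if x < elt then x :: pvInsU t elt
              else if x = elt then x :: t
              else elt :: x :: t

-- linear characterisation of the insertion point: length of the leading run < elt
def pvFindLt (xs : List String) (elt : String) : Nat :=
  match xs with
  | [] => 0
  | x :: t => if x < elt then pvFindLt t elt + 1 else 0

lemma pvFindLt_le (xs : List String) (elt : String) : pvFindLt xs elt ≤ xs.length := by
  induction xs with
  | nil => simp [pvFindLt]
  | cons x t ih => simp only [pvFindLt, List.length_cons]; split_ifs <;> omega

-- monotonicity of a strictly sorted list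
lemma sorted_mono {xs : List String} (h : xs.Pairwise (· < ·)) {i j : Nat}
    (hij : i ≤ j) (hj : j < xs.length) :
    xs[i]'(lt_of_le_of_lt hij hj) ≤ xs[j] := by
  rcases Nat.lt_or_ge i j with hlt | hge
  · exact le_of_lt ((List.pairwise_iff_getElem.mp h) i j _ hj hlt)
  · have : i = j := le_antisymm hij hge
    subst this; exact le_refl _

-- the binary search lands exactly on the lower/upper boundary
lemma pvBis_boundary (xs : List String) (elt : String) (hs : xs.Pairwise (· < ·)) :
    ∀ (n lo hi : Nat), hi - lo ≤ n → lo ≤ hi → hi ≤ xs.length →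
    (∀ j (hj : j < xs.length), j < lo → xs[j] < elt) →
    (∀ j (hj : j < xs.length), hi ≤ j → ¬ xs[j] < elt) →
    pvBis xs elt lo hi ≤ xs.length ∧
    (∀ j (hj : j < xs.length), j < pvBis xs elt lo hi → xs[j] < elt) ∧
    (∀ (hr : pvBis xs elt lo hi < xs.length), ¬ xs[pvBis xs elt lo hi] < elt) := by
  intro n
  induction n with
  | zero =>
    intro lo hi hfuel hlh hhl hlow hhigh
    have : lo = hi := by omega
    subst this
    rw [pvBis, dif_neg (by omega)]
    exact ⟨by omega, hlow, fun hr => hhigh lo hr (le_refl _)⟩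
  | succ n ih =>
    intro lo hi hfuel hlh hhl hlow hhigh
    by_cases hc : lo < hi
    · rw [pvBis, dif_pos hc]
      have hmidlt : (lo + hi) / 2 < hi := by omega
      have hmidge : lo ≤ (lo + hi) / 2 := by omega
      have hmidlen : (lo + hi) / 2 < xs.length := by omega
      have hget : PySem.List.pyGetD xs (((lo + hi) / 2 : Nat) : Int) "" = xs[(lo + hi) / 2] := by
        rw [PySem.List.pyGetD_natCast, List.getD_eq_getElem?_getD, List.getElem?_eq_getElem hmidlen]
        rfl
      simp only [hget]
      by_cases hv : xs[(lo + hi) / 2] < elt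
      · simp only [if_pos hv]
        refine ih ((lo + hi) / 2 + 1) hi (by omega) (by omega) hhl ?_ hhigh
        intro j hj hjlt
        calc xs[j] ≤ xs[(lo + hi) / 2] := sorted_mono hs (by omega) hmidlen
          _ < elt := hv
      · simp only [if_neg hv]
        refine ih lo ((lo + hi) / 2) (by omega) (by omega) (by omega) hlow ?_
        intro j hj hjge habs
        exact hv (lt_of_le_of_lt (sorted_mono hs hjge hj) habs)
    · rw [pvBis, dif_neg hc]
      have : lo = hi := by omega
      subst this
      exact ⟨by omega, hlow, fun hr => hhigh lo hr (le_refl _)⟩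

-- any boundary index is the leading-run length
lemma boundary_eq_findLt : ∀ (xs : List String) (elt : String) (r : Nat),
    r ≤ xs.length →
    (∀ j (hj : j < xs.length), j < r → xs[j] < elt) →
    (∀ (hr : r < xs.length), ¬ xs[r] < elt) →
    r = pvFindLt xs elt := by
  intro xs
  induction xs with
  | nil =>
    intro elt r h1 _ _
    simp only [List.length_nil, Nat.le_zero] at h1
    simp [pvFindLt, h1]
  | cons x t ih =>
    intro elt r h1 h2 h3
    simp only [pvFindLt]
    by_cases hx : x < elt
    · rw [if_pos hx]
      have hr0 : r ≠ 0 := by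
        intro h0; subst h0
        exact h3 (by simp) (by simpa using hx)
      obtain ⟨r', rfl⟩ : ∃ r', r = r' + 1 := ⟨r - 1, by omega⟩
      have := ih elt r' (by simpa using h1)
        (by
          intro j hj hjr
          have := h2 (j + 1) (by simpa using Nat.succ_lt_succ hj) (by omega)
          simpa using this)
        (by
          intro hr
          have := h3 (by simpa using Nat.succ_lt_succ hr)
          simpa using this)
      omega
    · rw [if_neg hx]
      by_contra hne
      have hr1 : 1 ≤ r := by omega
      exact hx (by simpa using h2 0 (by simp) (by omega))

-- on a sorted accumulator, B's binary search computes pvFindLt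
lemma pvBis_eq_findLt (out : List String) (elt : String) (hs : out.Pairwise (· < ·)) :
    pvBis out elt 0 out.length = pvFindLt out elt := by
  obtain ⟨b1, b2, b3⟩ := pvBis_boundary out elt hs out.length 0 out.length
    (by omega) (by omega) (le_refl _)
    (by intro j hj h; omega) (by intro j hj h; omega)
  exact boundary_eq_findLt out elt _ b1 b2 b3

-- inserting at the leading-run boundary (with the duplicate test) is ordered insert
lemma insert_findLt_eq_insU : ∀ (out : List String) (elt : String),
    (if out[pvFindLt out elt]? = some elt then out
     else PySem.List.insert out ((pvFindLt out elt : Nat) : Int) elt) = pvInsU out elt := by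
  intro out
  induction out with
  | nil =>
    intro elt
    simp [pvFindLt, pvInsU, PySem.List.insert_zero]
  | cons x t ih =>
    intro elt
    simp only [pvFindLt, pvInsU]
    by_cases hx : x < elt
    · rw [if_pos hx, if_pos hx]
      have hc : (x :: t)[pvFindLt t elt + 1]? = t[pvFindLt t elt]? := by simp
      rw [hc]
      rw [PySem.List.insert_natCast _ _ _ (by simpa using Nat.succ_le_succ (pvFindLt_le t elt))]
      simp only [List.take_succ_cons, List.drop_succ_cons, List.cons_append]
      rw [← PySem.List.insert_natCast _ _ _ (pvFindLt_le t elt)]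
      by_cases hcase : t[pvFindLt t elt]? = some elt
      · rw [if_pos hcase, ← ih elt, if_pos hcase]
      · rw [if_neg hcase, ← ih elt, if_neg hcase]
    · rw [if_neg hx, if_neg hx]
      simp only [Nat.cast_zero, List.getElem?_cons_zero]
      by_cases he : x = elt
      · rw [if_pos (by rw [he]), if_pos he]
      · rw [if_neg (by simpa using he), if_neg he, PySem.List.insert_zero]

lemma insU_mem : ∀ {xs : List String} {elt y : String},
    y ∈ pvInsU xs elt ↔ y ∈ xs ∨ y = elt := by
  intro xs elt y
  induction xs with
  | nil => simp [pvInsU]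
  | cons x t ih =>
    simp only [pvInsU]
    split_ifs with h1 h2
    · simp only [List.mem_cons, ih]; tauto
    · subst h2; simp only [List.mem_cons]; tauto
    · simp only [List.mem_cons]; tauto

lemma insU_pairwise {xs : List String} (elt : String) (h : xs.Pairwise (· < ·)) :
    (pvInsU xs elt).Pairwise (· < ·) := by
  induction xs with
  | nil => simp [pvInsU]
  | cons x t ih =>
    obtain ⟨hx, ht⟩ := List.pairwise_cons.mp h
    simp only [pvInsU]
    by_cases h1 : x < elt
    · rw [if_pos h1]
      refine List.pairwise_cons.mpr ⟨?_, ih ht⟩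
      intro y hy
      rcases insU_mem.mp hy with hy | rfl
      · exact hx y hy
      · exact h1
    · rw [if_neg h1]
      by_cases h2 : x = elt
      · rw [if_pos h2]; exact h
      · rw [if_neg h2]
        refine List.pairwise_cons.mpr ⟨?_, h⟩
        intro y hy
        have hex : elt < x := lt_of_le_of_ne (le_of_not_gt h1) (fun e => h2 e.symm)
        rcases List.mem_cons.mp hy with rfl | hy
        · exact hex
        · exact lt_trans hex (hx y hy)

-- on a sorted accumulator, B's whole step is ordered insert
lemma step_eq_insU (out : List String) (elt : String) (hs : out.Pairwise (· < ·)) :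
    (let lo := pvBis out elt 0 out.length
     if out[lo]? = some elt then out
     else PySem.List.insert out (lo : Int) elt) = pvInsU out elt := by
  simp only [pvBis_eq_findLt out elt hs]
  exact insert_findLt_eq_insU out elt

-- fold invariant for B: the accumulator stays strictly sorted with exactly the seen members
lemma fold_inv (ys : List String) : ∀ (acc : List String), acc.Pairwise (· < ·) →
    (ys.foldl
      (fun out_list elt =>
        let lo := pvBis out_list elt 0 out_list.length
        if out_list[lo]? = some elt then out_list
        else PySem.List.insert out_list (lo : Int) elt) acc).Pairwise (· < ·) ∧
    (∀ x, x ∈ ys.foldl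
      (fun out_list elt =>
        let lo := pvBis out_list elt 0 out_list.length
        if out_list[lo]? = some elt then out_list
        else PySem.List.insert out_list (lo : Int) elt) acc ↔ x ∈ acc ∨ x ∈ ys) := by
  induction ys with
  | nil => intro acc h; simpa using h
  | cons h t ih =>
    intro acc hacc
    simp only [List.foldl_cons]
    rw [step_eq_insU acc h hacc]
    obtain ⟨p1, p2⟩ := ih (pvInsU acc h) (insU_pairwise h hacc)
    refine ⟨p1, fun x => ?_⟩
    rw [p2, insU_mem]
    simp only [List.mem_cons]; tauto

lemma alt_pairwise (in_list : List String) :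
    (del_dup_list_alt in_list).Pairwise (· < ·) ∧
    (∀ x, x ∈ del_dup_list_alt in_list ↔ x ∈ in_list) := by
  unfold del_dup_list_alt
  obtain ⟨p1, p2⟩ := fold_inv in_list [] List.Pairwise.nil
  exact ⟨p1, fun x => by rw [p2]; simp⟩

-- ===== VERDICT (by name: the statement is the Claim_ definition above) =====
theorem del_dup_list_spec : Claim_equal_del_dup_list := by
  intro in_list _ _
  unfold Spec_del_dup_list del_dup_list
  obtain ⟨hpw, hmem⟩ := alt_pairwise in_list
  refine PySem.List.sorted_eq_of_perm_of_pairwise_lt _ _ (fun x => x) ?_ hpw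
  refine (List.perm_ext_iff_of_nodup (hpw.imp ne_of_lt) (PySem.Set.nodup_ofList _)).mpr ?_
  intro x
  rw [hmem, PySem.Set.mem_ofList]
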